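-- pv_equiv track=rewrite | github.com/stardvst/saed_big_data | rhomb.py | rhomb
-- ===== SOURCE A (Python) =====
-- def rhomb(n):
--     rows = ['*']
--     for spaces in range(1, n, 2):
--         rows.append('*' + ' ' * spaces + '*')
--
--     spaces = n // 2
--     for idx, row in enumerate(rows):
--         rows[idx] = '{0}{1}'.format(' ' * spaces, row)
--         spaces -= 1
--
--     rows = rows[:-1] + rows[::-1]
--
--     return '\n'.join(rows)
-- ===== SOURCE B (Python) =====
-- def rhomb(n):
--     m = n // 2
--     h = 1 + max(0, m)          # number of rows in the top half (incl. center)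
--     def line(i):
--         j = i if i < h else 2 * h - 2 - i   # distance-from-top index, symmetric about the center
--         pad = ' ' * (m - j)
--         if j == 0:
--             return pad + '*'
--         return pad + '*' + ' ' * (2 * j - 1) + '*'
--     return '\n'.join(line(i) for i in range(2 * h - 1))
-- ===== Notes on version B (the rewrite author's own statement) =====
-- stated objective: alternative
-- what changed: Each of the 2h-1 rows is emitted directly by a per-row closed form with a mirror index j = min(i, 2h-2-i), instead of building the top half in a list, re-prefixing it in a second enumerate pass, and mirroring it with rows[:-1] + rows[::-1].
import Mathlib
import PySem

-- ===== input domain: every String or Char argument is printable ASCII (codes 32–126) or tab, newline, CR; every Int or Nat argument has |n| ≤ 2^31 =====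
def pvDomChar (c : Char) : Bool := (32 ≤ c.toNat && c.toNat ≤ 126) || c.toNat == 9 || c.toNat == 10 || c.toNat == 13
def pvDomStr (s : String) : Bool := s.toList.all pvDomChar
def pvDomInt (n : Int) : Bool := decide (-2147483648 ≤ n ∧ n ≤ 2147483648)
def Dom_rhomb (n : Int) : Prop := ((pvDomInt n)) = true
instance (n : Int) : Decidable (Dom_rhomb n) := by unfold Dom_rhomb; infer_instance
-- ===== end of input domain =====

-- B emits each of the 2h-1 rows directly from a mirror index, instead of A's
-- build-half-list / re-prefix / slice-and-mirror passes; same output (alternative decomposition).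

-- ===== PORT A =====
-- ' ' * k on character lists (Python: negative k gives ''); exact
def pvRepA (k : Int) : List Char := List.replicate k.toNat ' '

def rhomb (n : Int) : String :=
  -- rows = ['*']; for spaces in range(1, n, 2): rows.append('*' + ' '*spaces + '*')
  let rows : List (List Char) :=
    (PySem.List.pyRange 1 n 2).foldl
      (fun rs spaces => rs ++ [['*'] ++ pvRepA spaces ++ ['*']]) [['*']]
  -- spaces = n // 2; for idx, row in enumerate(rows): rows[idx] = ' '*spaces + row; spaces -= 1
  -- (in-place assignment at increasing idx = ordered rebuild with the decremented counter)
  let st := rows.foldl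
      (fun (st : List (List Char) × Int) row => (st.1 ++ [pvRepA st.2 ++ row], st.2 - 1))
      (([] : List (List Char)), PySem.Int.floordiv n 2)
  let rows := st.1
  -- rows = rows[:-1] + rows[::-1]   (slice? is none only for step 0, so getD is never hit)
  let rows := PySem.List.slice rows none (some (-1)) ++
              (PySem.List.slice? rows none none (-1)).getD []
  -- '\n'.join(rows)
  String.ofList (PySem.Chars.join ['\n'] rows)

-- ===== PORT B =====
-- ' ' * k (Python: negative k gives ''); exact
def pvRepB (k : Int) : List Char := List.replicate k.toNat ' '

def rhombLine (m h i : Int) : List Char :=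
  let j := if i < h then i else 2 * h - 2 - i
  let pad := pvRepB (m - j)
  if j = 0 then pad ++ ['*']
  else pad ++ ['*'] ++ pvRepB (2 * j - 1) ++ ['*']

def rhomb_alt (n : Int) : String :=
  let m := PySem.Int.floordiv n 2
  let h := 1 + max 0 m
  String.ofList (PySem.Chars.join ['\n']
    ((PySem.List.pyRange 0 (2 * h - 1) 1).map (rhombLine m h)))

-- ===== PRECONDITION & SPEC =====
def Spec_rhomb (n : Int) (out : String) : Prop := out = rhomb_alt n
instance (n : Int) (out : String) : Decidable (Spec_rhomb n out) := by unfold Spec_rhomb; infer_instance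

-- ===== CLAIM (what is proved, stated in full; the proofs are below) =====
def Claim_equal_rhomb : Prop := ∀ (n : Int), Dom_rhomb n → Spec_rhomb n (rhomb n)

-- ===== LEMMAS AND PROOFS =====

-- canonical rows, used to characterise both ports
def pvBody (k : Nat) : List Char :=
  if k = 0 then ['*'] else ['*'] ++ pvRepA (2 * (k : Int) - 1) ++ ['*']

def pvLine (m : Int) (k : Nat) : List Char := pvRepA (m - (k : Int)) ++ pvBody k

theorem pv_foldl_push {α β : Type} (g : α → β) :
    ∀ (l : List α) (init : List β),
      l.foldl (fun rs x => rs ++ [g x]) init = init ++ l.map g := by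
  intro l
  induction l with
  | nil => simp
  | cons x xs ih => intro init; simp [List.foldl_cons, ih]

theorem pv_fold2 (g : Nat → List Char) :
    ∀ (L : Nat) (acc : List (List Char)) (sp : Int),
      ((List.range L).map g).foldl
        (fun (st : List (List Char) × Int) row => (st.1 ++ [pvRepA st.2 ++ row], st.2 - 1))
        (acc, sp)
      = (acc ++ (List.range L).map (fun k : Nat => pvRepA (sp - (k : Int)) ++ g k), sp - (L : Int)) := by
  intro L
  induction L with
  | zero => intro acc sp; simp
  | succ L ih =>
      intro acc sp
      rw [List.range_succ, List.map_append, List.foldl_append, ih]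
      simp only [List.map_append, List.map_cons, List.map_nil, List.foldl_cons, List.foldl_nil,
        List.append_assoc, Prod.mk.injEq]
      refine ⟨trivial, by push_cast; ring⟩

theorem pv_range_reverse (n : Nat) :
    (List.range (n + 1)).reverse = (List.range (n + 1)).map (fun k => n - k) := by
  apply List.ext_getElem
  · simp
  · intro i h1 h2
    simp only [List.length_reverse, List.length_range] at h1
    simp only [List.getElem_reverse, List.length_range, List.getElem_range, List.getElem_map]
    omega

theorem pv_mirror (f : Nat → List Char) (M : Nat) :
    ((List.range (M + 1)).map f).dropLast ++ ((List.range (M + 1)).map f).reverse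
      = ((List.range M).map f) ++ (List.range (M + 1)).map (fun k => f (M - k)) := by
  congr 1
  · rw [List.range_succ, List.map_append]
    simp
  · rw [← List.map_reverse, pv_range_reverse, List.map_map]
    rfl

theorem pv_hA (n : Int) (m : Int) (M : Nat) (hm : m = PySem.Int.floordiv n 2)
    (_hmM : m = (M : Int))
    (hrange : PySem.List.pyRange 1 n 2 = (List.range M).map (fun k : Nat => (1 : Int) + 2 * (k : Int))) :
    rhomb n = String.ofList (PySem.Chars.join ['\n']
      (((List.range M).map (pvLine m)) ++ (List.range (M + 1)).map (fun k => pvLine m (M - k)))) := by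
  simp only [rhomb]
  rw [hrange, ← hm, pv_foldl_push (fun spaces => ['*'] ++ pvRepA spaces ++ ['*'])]
  have hrows1 : ([['*']] ++ ((List.range M).map (fun k : Nat => (1 : Int) + 2 * (k : Int))).map
        (fun spaces => ['*'] ++ pvRepA spaces ++ ['*']))
      = (List.range (M + 1)).map pvBody := by
    rw [List.range_succ_eq_map, List.map_cons, List.map_map, List.map_map, List.singleton_append]
    congr 1
    apply List.map_congr_left
    intro k _
    show (['*'] ++ pvRepA (1 + 2 * (k : Int)) ++ ['*']) = pvBody (k + 1)
    unfold pvBody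
    rw [if_neg (Nat.succ_ne_zero k)]
    have : (2 * ((k + 1 : Nat) : Int) - 1) = 1 + 2 * (k : Int) := by push_cast; ring
    rw [this]
  rw [hrows1, pv_fold2 pvBody (M + 1)]
  simp only [List.nil_append]
  rw [PySem.List.slice_to_neg_one, PySem.List.slice?_none_none_neg_one]
  simp only [Option.getD_some]
  have hrows2 : (List.range (M + 1)).map (fun k : Nat => pvRepA (m - (k : Int)) ++ pvBody k)
      = (List.range (M + 1)).map (pvLine m) := rfl
  rw [hrows2, pv_mirror (pvLine m) M]

theorem pv_rl (m h i : Int) (k : Nat)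
    (hsel : (if i < h then i else 2 * h - 2 - i) = (k : Int)) :
    rhombLine m h i = pvLine m k := by
  simp only [rhombLine, hsel]
  unfold pvLine pvBody
  by_cases h0 : k = 0
  · subst h0
    norm_num [pvRepA, pvRepB]
  · rw [if_neg (by exact_mod_cast h0 : ¬ ((k : Int) = 0)), if_neg h0]
    simp [pvRepA, pvRepB, List.append_assoc]

theorem pv_hB (n : Int) (m : Int) (M : Nat) (hm : m = PySem.Int.floordiv n 2)
    (hmM : m = (M : Int)) (hm1 : 1 ≤ m) :
    rhomb_alt n = String.ofList (PySem.Chars.join ['\n']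
      (((List.range M).map (pvLine m)) ++ (List.range (M + 1)).map (fun k => pvLine m (M - k)))) := by
  simp only [rhomb_alt]
  rw [← hm]
  have hh : 1 + max 0 m = m + 1 := by omega
  rw [hh, PySem.List.pyRange_one 0 (2 * (m + 1) - 1)]
  have hlen : ((2 * (m + 1) - 1) - 0).toNat = M + (M + 1) := by omega
  rw [hlen, List.range_add]
  simp only [List.map_append, List.map_map]
  apply congrArg
  apply congrArg
  congr 1
  · apply List.map_congr_left
    intro k hk
    simp only [List.mem_range] at hk
    show rhombLine m (m + 1) ((0 : Int) + (k : Int)) = pvLine m k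
    exact pv_rl m (m + 1) _ k (by split_ifs <;> omega)
  · apply List.map_congr_left
    intro k hk
    simp only [List.mem_range] at hk
    show rhombLine m (m + 1) ((0 : Int) + ((M + k : Nat) : Int)) = pvLine m (M - k)
    exact pv_rl m (m + 1) _ (M - k) (by split_ifs <;> omega)

theorem rhomb_eq_alt (n : Int) : rhomb n = rhomb_alt n := by
  by_cases hn : n ≤ 1
  · -- degenerate: a single row
    have hr : PySem.List.pyRange 1 n 2 = [] := by
      rw [PySem.List.pyRange_of_pos 1 n (by norm_num)]
      simp [show ¬ (1 < n) by omega]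
    have hfd : PySem.Int.floordiv n 2 ≤ 0 := by
      by_contra h
      have := (PySem.Int.le_floordiv_iff_mul_le (a := n) (b := 2) (q := 1) (by norm_num)).mp (by omega)
      omega
    have hm : max 0 (PySem.Int.floordiv n 2) = 0 := by omega
    simp only [rhomb, rhomb_alt, hr, hm]
    rw [PySem.List.pyRange_one_cons (by norm_num), PySem.List.pyRange_one_eq_nil (by norm_num)]
    simp [PySem.List.slice_to_neg_one, PySem.List.slice?_none_none_neg_one,
          PySem.Chars.join, rhombLine, pvRepA, pvRepB]
  · have hn1 : 1 < n := by omega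
    set m : Int := PySem.Int.floordiv n 2 with hmdef
    have hmdiv : m = n / 2 := PySem.Int.floordiv_eq_ediv_of_pos (by norm_num)
    have hm1 : 1 ≤ m := by rw [hmdiv]; omega
    set M : Nat := m.toNat with hMdef
    have hmM : m = (M : Int) := by omega
    have hrange : PySem.List.pyRange 1 n 2
        = (List.range M).map (fun k : Nat => (1 : Int) + 2 * (k : Int)) := by
      rw [PySem.List.pyRange_of_pos 1 n (by norm_num)]
      have h1 : (if (1:Int) < n then ((n - 1 + 2 - 1) / 2).toNat else 0) = M := by
        rw [if_pos (by omega)]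
        omega
      rw [h1]
    rw [pv_hA n m M hmdef hmM hrange, pv_hB n m M hmdef hmM hm1]

-- ===== VERDICT (by name: the statement is the Claim_ definition above) =====
theorem rhomb_spec : Claim_equal_rhomb := by
  intro n _
  unfold Spec_rhomb
  exact rhomb_eq_alt n
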